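-- pv_equiv track=rewrite | github.com/MatthewTran22/full-stack_boilerplate_AQ | backend/app/services/ai_generator.py | _fallback_page
-- ===== SOURCE A (Python) =====
-- def _fallback_page(component_order: list[tuple[str, str, int]]) -> dict:
--     """Generate a simple mechanical page.tsx as fallback if the assembler fails."""
--     seen_names: set[str] = set()
--     import_lines = []
--     render_lines = []
--     for comp_name, import_path, agent_num in component_order:
--         if comp_name in seen_names:
--             continue  # skip duplicate — first (lowest agent) wins
--         seen_names.add(comp_name)
--         import_lines.append(f'import {comp_name} from "{import_path}";')
--         render_lines.append(f"      <{comp_name} />")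
--
--     page_content = (
--         '"use client";\n\n'
--         + "\n".join(import_lines) + "\n\n"
--         + "export default function Home() {\n"
--         + "  return (\n"
--         + '    <main className="min-h-screen">\n'
--         + "\n".join(render_lines) + "\n"
--         + "    </main>\n"
--         + "  );\n"
--         + "}\n"
--     )
--     return {"content": page_content}
-- ===== SOURCE B (Python) =====
-- def _dedup_first(items: list[tuple[str, str, int]]) -> list[tuple[str, str]]:
--     """Recursive nub: keep the head, delete every later entry with the same name, recurse."""
--     if not items:
--         return []
--     name, path, _ = items[0]
--     return [(name, path)] + _dedup_first([t for t in items[1:] if t[0] != name])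
--
--
-- def _fallback_page(component_order: list[tuple[str, str, int]]) -> dict:
--     """Generate a simple mechanical page.tsx as fallback if the assembler fails."""
--     pairs = _dedup_first(component_order)
--     import_lines = [f'import {n} from "{p}";' for n, p in pairs]
--     render_lines = [f"      <{n} />" for n, _ in pairs]
--
--     page_content = (
--         '"use client";\n\n'
--         + "\n".join(import_lines) + "\n\n"
--         + "export default function Home() {\n"
--         + "  return (\n"
--         + '    <main className="min-h-screen">\n'
--         + "\n".join(render_lines) + "\n"
--         + "    </main>\n"
--         + "  );\n"
--         + "}\n"
--     )
--     return {"content": page_content}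
-- ===== Notes on version B (the rewrite author's own statement) =====
-- stated objective: alternative
-- what changed: Replaces the iterative seen-set single pass by a recursive nub that keeps the head and filters later entries with the same name out of the tail before recursing, then derives the import and render lines in two separate mapping passes over the deduplicated pairs.
import Mathlib
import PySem

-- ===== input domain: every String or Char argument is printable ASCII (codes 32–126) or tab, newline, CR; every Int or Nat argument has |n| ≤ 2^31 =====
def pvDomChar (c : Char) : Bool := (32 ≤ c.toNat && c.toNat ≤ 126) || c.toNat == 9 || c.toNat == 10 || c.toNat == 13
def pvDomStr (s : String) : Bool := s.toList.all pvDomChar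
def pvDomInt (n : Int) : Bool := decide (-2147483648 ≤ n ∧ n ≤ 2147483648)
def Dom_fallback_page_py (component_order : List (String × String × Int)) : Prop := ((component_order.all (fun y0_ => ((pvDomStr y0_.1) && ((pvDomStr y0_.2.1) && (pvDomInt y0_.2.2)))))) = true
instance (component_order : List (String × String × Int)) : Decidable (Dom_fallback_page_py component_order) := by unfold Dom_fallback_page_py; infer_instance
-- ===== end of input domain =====

-- B replaces A's iterative seen-set pass by a recursive nub (keep head, filter its duplicates
-- out of the tail, recurse) followed by two separate mapping passes (objective: alternative).

-- shared line formatters (the same f-strings appear in both Pythons)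
def pvImpLine (np : String × String) : String := "import " ++ np.1 ++ " from \"" ++ np.2 ++ "\";"
def pvRenLine (n : String) : String := "      <" ++ n ++ " />"

def pvAssemble (importLines renderLines : List String) : String :=
  "\"use client\";\n\n"
    ++ PySem.Str.join "\n" importLines ++ "\n\n"
    ++ "export default function Home() {\n"
    ++ "  return (\n"
    ++ "    <main className=\"min-h-screen\">\n"
    ++ PySem.Str.join "\n" renderLines ++ "\n"
    ++ "    </main>\n"
    ++ "  );\n"
    ++ "}\n"

-- ===== PORT A =====
-- A's loop: seen-set plus the two accumulating line lists
def fpA_loop : List (String × String × Int) → PySem.Set String → List String → List String →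
    List String × List String
  | [], _, imp, ren => (imp, ren)
  | (n, p, _) :: rest, seen, imp, ren =>
      if PySem.Set.contains seen n then fpA_loop rest seen imp ren
      else fpA_loop rest (PySem.Set.add seen n) (imp ++ [pvImpLine (n, p)]) (ren ++ [pvRenLine n])

def fallback_page_py (component_order : List (String × String × Int)) : List (String × String) :=
  let lines := fpA_loop component_order PySem.Set.empty [] []
  [("content", pvAssemble lines.1 lines.2)]

-- ===== PORT B =====
-- recursive nub: keep the head, delete later entries with the same name, recurse (Source B's _dedup_first)
def fpB_dedup : List (String × String × Int) → List (String × String)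
  | [] => []
  | (n, p, _) :: t => (n, p) :: fpB_dedup (t.filter (fun x => decide (x.1 ≠ n)))
termination_by xs => xs.length
decreasing_by
  simp only [List.length_unattach, List.length_cons, Nat.lt_succ_iff]
  exact (List.length_filter_le _ _).trans (by simp)

def fallback_page_py_alt (component_order : List (String × String × Int)) : List (String × String) :=
  let pairs := fpB_dedup component_order
  let importLines := pairs.map pvImpLine
  let renderLines := pairs.map (fun q => pvRenLine q.1)
  [("content", pvAssemble importLines renderLines)]

-- ===== PRECONDITION & SPEC =====
def Spec_fallback_page_py (component_order : List (String × String × Int)) (out : List (String × String)) : Prop := out = fallback_page_py_alt component_order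
instance (component_order : List (String × String × Int)) (out : List (String × String)) : Decidable (Spec_fallback_page_py component_order out) := by unfold Spec_fallback_page_py; infer_instance

-- ===== CLAIM (what is proved, stated in full; the proofs are below) =====
def Claim_equal_fallback_page_py : Prop := ∀ (component_order : List (String × String × Int)), Dom_fallback_page_py component_order → Spec_fallback_page_py component_order (fallback_page_py component_order)

-- ===== LEMMAS AND PROOFS =====

-- unfolding equations for the well-founded fpB_dedup
lemma fpB_dedup_nil : fpB_dedup [] = [] := by rw [fpB_dedup.eq_def]

lemma fpB_dedup_cons (n p : String) (a : Int) (t : List (String × String × Int)) :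
    fpB_dedup ((n, p, a) :: t) = (n, p) :: fpB_dedup (t.filter (fun x => decide (x.1 ≠ n))) := by
  rw [fpB_dedup.eq_def]

-- A's streaming loop equals the recursive nub applied to the not-yet-seen entries.
lemma fpA_loop_eq_dedup (rest : List (String × String × Int)) :
    ∀ (seen : PySem.Set String) (imp ren : List String),
      fpA_loop rest seen imp ren
        = (imp ++ (fpB_dedup (rest.filter (fun x => !(PySem.Set.contains seen x.1)))).map pvImpLine,
           ren ++ (fpB_dedup (rest.filter (fun x => !(PySem.Set.contains seen x.1)))).map
                    (fun q => pvRenLine q.1)) := by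
  induction rest with
  | nil => intro seen imp ren; simp [fpA_loop, fpB_dedup_nil]
  | cons hd tl ih =>
    intro seen imp ren
    obtain ⟨n, p, a⟩ := hd
    by_cases hc : PySem.Set.contains seen n = true
    · simp only [fpA_loop, hc, if_true, List.filter_cons]
      simp only [Bool.not_true, Bool.false_eq_true, if_false]
      exact ih seen imp ren
    · have hcf : PySem.Set.contains seen n = false := by simpa using hc
      have hmem : n ∉ seen := by simpa [PySem.Set.contains] using hcf
      have hadd : PySem.Set.add seen n = seen ++ [n] := by
        simp [PySem.Set.add, PySem.Set.contains, hmem]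
      have hfilt : tl.filter (fun x => !(PySem.Set.contains (PySem.Set.add seen n) x.1))
          = (tl.filter (fun x => !(PySem.Set.contains seen x.1))).filter
              (fun x => decide (x.1 ≠ n)) := by
        rw [List.filter_filter]
        apply List.filter_congr
        intro x _
        simp [hadd, PySem.Set.contains, Bool.and_comm]
      rw [show fpA_loop ((n, p, a) :: tl) seen imp ren
            = fpA_loop tl (PySem.Set.add seen n) (imp ++ [pvImpLine (n, p)])
                (ren ++ [pvRenLine n]) from by simp [fpA_loop, PySem.Set.contains, hmem]]
      rw [ih, hfilt]
      simp [PySem.Set.contains, hmem, fpB_dedup_cons]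

-- ===== VERDICT (by name: the statement is the Claim_ definition above) =====
theorem fallback_page_py_spec : Claim_equal_fallback_page_py := by
  intro component_order _
  show _ = _
  have hfilt : component_order.filter
      (fun x => !(PySem.Set.contains (PySem.Set.empty : PySem.Set String) x.1))
      = component_order := by
    apply List.filter_eq_self.mpr
    intro x _
    simp [PySem.Set.contains, PySem.Set.empty]
  simp only [fallback_page_py, fallback_page_py_alt,
    fpA_loop_eq_dedup component_order PySem.Set.empty [] [], hfilt, List.nil_append]
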